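-- pv_equiv track=rewrite | github.com/adit-prim/project_iseng | gabungan avk.py | vigenere_encrypt_preserve
-- ===== SOURCE A (Python) =====
-- def vigenere_encrypt_preserve(text, key):
--     key = key.upper()
--     result = ''
--     key_index = 0
--
--     for char in text:
--         if char.isalpha():
--             offset = ord('A') if char.isupper() else ord('a')
--             k = ord(key[key_index % len(key)]) - ord('A')
--             c = chr((ord(char) - offset + k) % 26 + offset)
--             result += c
--             key_index += 1
--         else:
--             result += char  # spasi, tanda baca, angka tetap
--     return result
-- ===== SOURCE B (Python) =====
-- def vigenere_encrypt_preserve(text, key):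
--     key = key.upper()
--     letters = [c for c in text if c.isalpha()]
--     encrypted = [
--         chr((ord(c) - (ord('A') if c.isupper() else ord('a'))
--              + ord(key[i % len(key)]) - ord('A')) % 26
--             + (ord('A') if c.isupper() else ord('a')))
--         for i, c in enumerate(letters)
--     ]
--     it = iter(encrypted)
--     return ''.join(next(it) if ch.isalpha() else ch for ch in text)
-- ===== Notes on version B (the rewrite author's own statement) =====
-- stated objective: alternative
-- what changed: B replaces A's single stateful loop (string concatenation plus a manually maintained key_index counter) with a three-phase pipeline: extract the alphabetic characters, encrypt them positionally with enumerate, then reassemble by splicing the ciphertext letters back over the original text with an iterator.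
import Mathlib
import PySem

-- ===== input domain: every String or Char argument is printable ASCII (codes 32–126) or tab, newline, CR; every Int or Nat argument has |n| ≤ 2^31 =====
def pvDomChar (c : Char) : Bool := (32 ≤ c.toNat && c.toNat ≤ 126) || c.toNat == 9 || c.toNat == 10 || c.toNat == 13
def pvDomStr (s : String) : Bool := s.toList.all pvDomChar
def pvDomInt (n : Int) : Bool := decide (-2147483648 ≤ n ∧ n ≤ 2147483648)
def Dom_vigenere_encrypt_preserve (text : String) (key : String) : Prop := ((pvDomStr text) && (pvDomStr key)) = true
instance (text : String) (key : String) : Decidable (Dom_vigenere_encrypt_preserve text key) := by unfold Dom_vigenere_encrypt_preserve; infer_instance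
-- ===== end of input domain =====

-- B rebuilds the result as a three-phase pipeline (filter letters, encrypt with enumerate, splice back)
-- instead of A's single stateful loop with a key_index counter; objective: alternative decomposition.

-- ===== PORT A =====
-- literal transliteration of A's for-loop: state = (result, key_index)
def vigenere_encrypt_preserve (text : String) (key : String) : String :=
  let keyU := PySem.Chars.upper key.toList
  let st := text.toList.foldl (fun (st : List Char × Int) ch =>
    if PySem.Chars.isalpha ch then
      let offset : Int := if PySem.Chars.isupper ch then 65 else 97
      -- key[key_index % len(key)]: pyGet? is none exactly where Python raises (excluded by Pre_)
      let kc := (PySem.List.pyGet? keyU (PySem.Int.mod st.2 (keyU.length : Int))).getD 'A'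
      let k : Int := (kc.toNat : Int) - 65
      let c := Char.ofNat (PySem.Int.mod ((ch.toNat : Int) - offset + k) 26 + offset).toNat
      (st.1 ++ [c], st.2 + 1)
    else
      (st.1 ++ [ch], st.2)) ([], 0)
  String.mk st.1

-- ===== PORT B =====
-- encryption of one letter at key position i (Source B's comprehension body)
def pvEncChar (keyU : List Char) (i : Int) (c : Char) : Char :=
  let offset : Int := if PySem.Chars.isupper c then 65 else 97
  let kc := (PySem.List.pyGet? keyU (PySem.Int.mod i (keyU.length : Int))).getD 'A'
  Char.ofNat (PySem.Int.mod ((c.toNat : Int) - offset + ((kc.toNat : Int) - 65)) 26 + offset).toNat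

-- ''.join(next(it) if ch.isalpha() else ch for ch in text): splice encrypted letters back over text
def pvSplice : List Char → List Char → List Char
  | [], _ => []
  | ch :: cs, es =>
    if PySem.Chars.isalpha ch then
      match es with
      | e :: es' => e :: pvSplice cs es'
      | [] => ch :: pvSplice cs []   -- iterator exhausted: unreachable (letter counts match)
    else ch :: pvSplice cs es

def vigenere_encrypt_preserve_alt (text : String) (key : String) : String :=
  let keyU := PySem.Chars.upper key.toList
  let letters := text.toList.filter (fun c => PySem.Chars.isalpha c)
  let encrypted := (PySem.List.enumerate letters 0).map (fun p => pvEncChar keyU p.1 p.2)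
  String.mk (pvSplice text.toList encrypted)

-- ===== PRECONDITION & SPEC =====
-- Pre_ excludes only the inputs where Python A raises ZeroDivisionError (empty key while text
-- contains a letter); B raises there too.
def Pre_vigenere_encrypt_preserve (text : String) (key : String) : Prop :=
  key ≠ "" ∨ (text.toList.all (fun c => !PySem.Chars.isalpha c)) = true
instance (text : String) (key : String) : Decidable (Pre_vigenere_encrypt_preserve text key) := by
  unfold Pre_vigenere_encrypt_preserve; infer_instance
def pvWitness_vigenere_encrypt_preserve : String × String := ("Hello, World! 123", "Key")
def Spec_vigenere_encrypt_preserve (text : String) (key : String) (out : String) : Prop := out = vigenere_encrypt_preserve_alt text key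
instance (text : String) (key : String) (out : String) : Decidable (Spec_vigenere_encrypt_preserve text key out) := by unfold Spec_vigenere_encrypt_preserve; infer_instance

-- ===== CLAIM (what is proved, stated in full; the proofs are below) =====
def Claim_equal_vigenere_encrypt_preserve : Prop := ∀ (text : String) (key : String), Dom_vigenere_encrypt_preserve text key → Pre_vigenere_encrypt_preserve text key → Spec_vigenere_encrypt_preserve text key (vigenere_encrypt_preserve text key)

-- ===== LEMMAS AND PROOFS =====

-- common characterisation: encrypt the letters of l, key positions starting at j
def pvVig (keyU : List Char) : List Char → Int → List Char
  | [], _ => []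
  | c :: cs, j =>
    if PySem.Chars.isalpha c then pvEncChar keyU j c :: pvVig keyU cs (j + 1)
    else c :: pvVig keyU cs j

theorem pvA_foldl (keyU : List Char) (l : List Char) :
    ∀ (acc : List Char) (j : Int),
      (l.foldl (fun (st : List Char × Int) ch =>
        if PySem.Chars.isalpha ch then
          let offset : Int := if PySem.Chars.isupper ch then 65 else 97
          let kc := (PySem.List.pyGet? keyU (PySem.Int.mod st.2 (keyU.length : Int))).getD 'A'
          let k : Int := (kc.toNat : Int) - 65
          let c := Char.ofNat (PySem.Int.mod ((ch.toNat : Int) - offset + k) 26 + offset).toNat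
          (st.1 ++ [c], st.2 + 1)
        else
          (st.1 ++ [ch], st.2)) (acc, j)).1 = acc ++ pvVig keyU l j := by
  induction l with
  | nil => intro acc j; simp [pvVig]
  | cons c cs ih =>
    intro acc j
    by_cases h : PySem.Chars.isalpha c = true
    · simp only [List.foldl_cons, h, if_pos, pvVig]
      rw [ih]
      simp [pvEncChar]
    · simp only [List.foldl_cons, pvVig, h, if_neg, Bool.false_eq_true, not_false_iff]
      rw [ih]
      simp

theorem pvB_splice (keyU : List Char) (l : List Char) :
    ∀ (j : Int),
      pvSplice l ((PySem.List.enumerate (l.filter (fun c => PySem.Chars.isalpha c)) j).map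
        (fun p => pvEncChar keyU p.1 p.2)) = pvVig keyU l j := by
  induction l with
  | nil => intro j; simp [pvSplice, pvVig]
  | cons c cs ih =>
    intro j
    by_cases h : PySem.Chars.isalpha c = true
    · simp only [List.filter_cons, h, if_pos, PySem.List.enumerate_cons, List.map_cons,
        pvSplice, pvVig]
      rw [ih]
    · simp only [List.filter_cons, h, pvSplice, pvVig, Bool.false_eq_true, if_neg,
        not_false_iff]
      rw [ih]

-- ===== VERDICT (by name: the statement is the Claim_ definition above) =====
theorem vigenere_encrypt_preserve_spec : Claim_equal_vigenere_encrypt_preserve := by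
  intro text key _ _
  unfold Spec_vigenere_encrypt_preserve vigenere_encrypt_preserve vigenere_encrypt_preserve_alt
  dsimp only
  rw [pvA_foldl, pvB_splice]
  simp
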